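-- pv_equiv track=rewrite | github.com/alfredronning/adventofcode | 2022/day25/solver.py | encode_snafu
-- ===== SOURCE A (Python) =====
-- def encode_snafu(decimal):
--     snafu = ""
--     while decimal:
--         decimal, digit = divmod(decimal, 5)
--         if digit % 5 < 3:
--             snafu += str(digit)
--         else:
--             decimal += 1
--             if digit % 5 == 3:
--                 snafu += "="
--             else:
--                 snafu += "-"
--     return snafu[::-1]
-- ===== SOURCE B (Python) =====
-- def encode_snafu(decimal):
--     if decimal == 0:
--         return ""
--     q, d = divmod(decimal, 5)
--     if d < 3:
--         return encode_snafu(q) + str(d)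
--     return encode_snafu(q + 1) + ("=" if d == 3 else "-")
-- ===== Notes on version B (the rewrite author's own statement) =====
-- stated objective: alternative
-- what changed: Replaces A's while-loop that accumulates digits least-significant-first and reverses at the end with a recursion over the magnitude that emits digits most-significant-first, so no reversal is needed.
import Mathlib
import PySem

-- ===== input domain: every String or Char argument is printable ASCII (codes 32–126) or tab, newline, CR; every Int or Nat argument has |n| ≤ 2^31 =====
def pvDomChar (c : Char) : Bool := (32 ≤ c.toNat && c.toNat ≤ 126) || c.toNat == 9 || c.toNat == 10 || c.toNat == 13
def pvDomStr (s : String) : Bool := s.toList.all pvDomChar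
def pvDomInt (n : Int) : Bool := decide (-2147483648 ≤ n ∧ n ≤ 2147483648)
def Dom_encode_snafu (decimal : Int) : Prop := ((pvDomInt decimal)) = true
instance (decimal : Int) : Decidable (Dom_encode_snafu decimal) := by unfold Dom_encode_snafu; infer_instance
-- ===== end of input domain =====

-- B builds the SNAFU digits most-significant-first by recursion on the quotient instead of
-- A's while-loop that appends least-significant-first and reverses at the end; same cost.

-- termination helpers (cited by both ports' decreasing_by)
theorem pvStep1 (n : Int) (_hn : ¬ n = 0) (h : PySem.Int.mod n 5 < 3) :
    (PySem.Int.floordiv n 5).natAbs < n.natAbs := by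
  have hq := PySem.Int.floordiv_mul_add_mod n 5
  have h0 := PySem.Int.mod_nonneg n (b := 5) (by norm_num)
  omega

theorem pvStep2 (n : Int) (_hn : ¬ n = 0) (h : ¬ PySem.Int.mod n 5 < 3) :
    (PySem.Int.floordiv n 5 + 1).natAbs < n.natAbs := by
  have hq := PySem.Int.floordiv_mul_add_mod n 5
  have h1 := PySem.Int.mod_lt n (b := 5) (by norm_num)
  omega

theorem pvModMod (n : Int) : PySem.Int.mod (PySem.Int.mod n 5) 5 = PySem.Int.mod n 5 := by
  have h0 := PySem.Int.mod_nonneg n (b := 5) (by norm_num)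
  have h1 := PySem.Int.mod_lt n (b := 5) (by norm_num)
  rw [PySem.Int.mod_eq_emod_of_pos (b := 5) (by norm_num)]
  omega

-- ===== PORT A =====
-- the while loop; decimal, digit = divmod(decimal, 5) written as floordiv/mod at the use sites
def encodeLoopA (decimal : Int) (snafu : String) : String :=
  if decimal = 0 then snafu
  else
    if PySem.Int.mod (PySem.Int.mod decimal 5) 5 < 3 then
      encodeLoopA (PySem.Int.floordiv decimal 5) (snafu ++ PySem.Int.toStr (PySem.Int.mod decimal 5))
    else
      encodeLoopA (PySem.Int.floordiv decimal 5 + 1)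
        (snafu ++ (if PySem.Int.mod (PySem.Int.mod decimal 5) 5 = 3 then "=" else "-"))
termination_by decimal.natAbs
decreasing_by
  · exact pvStep1 decimal (by omega) (by rw [pvModMod] at *; assumption)
  · exact pvStep2 decimal (by omega) (by rw [pvModMod] at *; assumption)

def encode_snafu (decimal : Int) : String :=
  (PySem.Str.slice? (encodeLoopA decimal "") none none (-1)).getD ""   -- snafu[::-1]; step -1 never raises

-- ===== PORT B =====
def encode_snafu_alt (decimal : Int) : String :=
  if decimal = 0 then ""
  else  -- q, d = divmod(decimal, 5), written at the use sites
    if PySem.Int.mod decimal 5 < 3 then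
      encode_snafu_alt (PySem.Int.floordiv decimal 5) ++ PySem.Int.toStr (PySem.Int.mod decimal 5)
    else
      encode_snafu_alt (PySem.Int.floordiv decimal 5 + 1)
        ++ (if PySem.Int.mod decimal 5 = 3 then "=" else "-")
termination_by decimal.natAbs
decreasing_by
  · exact pvStep1 decimal (by omega) (by assumption)
  · exact pvStep2 decimal (by omega) (by assumption)

-- ===== PRECONDITION & SPEC =====
def Spec_encode_snafu (decimal : Int) (out : String) : Prop := out = encode_snafu_alt decimal
instance (decimal : Int) (out : String) : Decidable (Spec_encode_snafu decimal out) := by unfold Spec_encode_snafu; infer_instance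

-- ===== CLAIM (what is proved, stated in full; the proofs are below) =====
def Claim_equal_encode_snafu : Prop := ∀ (decimal : Int), Dom_encode_snafu decimal → Spec_encode_snafu decimal (encode_snafu decimal)

-- ===== LEMMAS AND PROOFS =====

theorem pvLoopA_eq (decimal : Int) (snafu : String) :
    (encodeLoopA decimal snafu).toList
      = snafu.toList ++ (encode_snafu_alt decimal).toList.reverse := by
  induction decimal, snafu using encodeLoopA.induct with
  | case1 s => simp [encodeLoopA, encode_snafu_alt]
  | case2 n s hn hlt ih =>
    rw [pvModMod] at hlt
    rw [encodeLoopA, encode_snafu_alt, if_neg hn, if_neg hn, pvModMod, if_pos hlt, if_pos hlt]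
    have h0 := PySem.Int.mod_nonneg n (b := 5) (by norm_num)
    obtain h | h | h : PySem.Int.mod n 5 = 0 ∨ PySem.Int.mod n 5 = 1 ∨ PySem.Int.mod n 5 = 2 := by
      omega
    all_goals rw [h] at ih ⊢
    all_goals rw [ih]
    all_goals simp
    all_goals decide
  | case3 n s hn hlt ih =>
    rw [pvModMod] at hlt
    rw [encodeLoopA, encode_snafu_alt, if_neg hn, if_neg hn, pvModMod, if_neg hlt, if_neg hlt]
    simp only [pvModMod, dite_eq_ite] at ih
    rw [ih]
    by_cases h : PySem.Int.mod n 5 = 3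
    · rw [if_pos h] at *
      simp
    · rw [if_neg h] at *
      simp

-- ===== VERDICT (by name: the statement is the Claim_ definition above) =====
theorem encode_snafu_spec : Claim_equal_encode_snafu := by
  intro decimal _
  unfold Spec_encode_snafu encode_snafu
  rw [PySem.Str.slice?_none_none_neg_one]
  apply String.ext
  simp [pvLoopA_eq decimal ""]
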